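-- pv_equiv track=rewrite | github.com/softwareunderground/gio | gio/geo.py | parse_geo_comments_section
-- ===== SOURCE A (Python) =====
-- def parse_geo_comments_section(contents):
--     """Parse a COMMENTS section from a .geo file.
--
--     Args:
--         contents (list of str): contents of the section.
--
--     Returns: string
--
--     """
--     sets = []
--     set_lines = []
--     for line in contents:
--         if len(line) > 3 and line[:3] == "UHL":
--             prefix = line[:4]
--             value = line[4:]
--             if prefix == "UHL1":
--                 if set_lines:
--                     sets.append("\n".join([v for p, v in set_lines]))
--                     set_lines = []
--             else:
--                 set_lines.append((prefix, value))
--     if set_lines: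
--         sets.append("\n".join([v for p, v in set_lines]))
--     return sets
-- ===== SOURCE B (Python) =====
-- def parse_geo_comments_section(contents):
--     """Parse a COMMENTS section from a .geo file (two-phase: tokenize, then split runs)."""
--     toks = [None if line[:4] == "UHL1" else line[4:]
--             for line in contents if len(line) > 3 and line[:3] == "UHL"]
--     sets = []
--     i, n = 0, len(toks)
--     while i < n:
--         if toks[i] is None:
--             i += 1
--             continue
--         j = i
--         while j < n and toks[j] is not None:
--             j += 1
--         sets.append("\n".join(toks[i:j]))
--         i = j
--     return sets
-- ===== Notes on version B (the rewrite author's own statement) =====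
-- stated objective: alternative
-- what changed: Replaces A's single accumulate-and-flush fold (running set_lines buffer flushed at UHL1 and at the end) with two separate phases: first tokenize the qualifying UHL lines into a list of values/separator markers, then split that list into maximal runs and join each run.
import Mathlib
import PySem

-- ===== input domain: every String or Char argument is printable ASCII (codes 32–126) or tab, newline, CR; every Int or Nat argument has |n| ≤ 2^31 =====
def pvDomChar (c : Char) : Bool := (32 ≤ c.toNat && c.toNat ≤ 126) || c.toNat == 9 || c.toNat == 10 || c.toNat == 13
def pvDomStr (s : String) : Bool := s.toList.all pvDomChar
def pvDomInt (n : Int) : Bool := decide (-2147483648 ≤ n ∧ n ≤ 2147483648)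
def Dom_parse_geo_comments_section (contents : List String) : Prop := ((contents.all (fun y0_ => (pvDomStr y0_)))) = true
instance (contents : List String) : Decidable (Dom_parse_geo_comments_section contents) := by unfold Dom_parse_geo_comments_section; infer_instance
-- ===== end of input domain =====

-- B separates tokenizing the qualifying UHL lines from splitting them into runs at UHL1
-- separators (two phases), instead of A's single accumulate-and-flush fold; objective: alternative.

-- ===== PORT A =====
-- the loop body of A: state = (sets, set_lines)
def pvStepA (st : List String × List (String × String)) (line : String) :
    List String × List (String × String) :=
  if 3 < PySem.Str.len line ∧ PySem.Str.slice line none (some 3) = "UHL" then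
    let pre := PySem.Str.slice line none (some 4)
    let value := PySem.Str.slice line (some 4) none
    if pre = "UHL1" then
      if st.2 ≠ [] then (st.1 ++ [PySem.Str.join "\n" (st.2.map (fun pv => pv.2))], [])
      else st
    else (st.1, st.2 ++ [(pre, value)])
  else st

def parse_geo_comments_section (contents : List String) : List String :=
  let st := contents.foldl pvStepA ([], [])
  if st.2 ≠ [] then st.1 ++ [PySem.Str.join "\n" (st.2.map (fun pv => pv.2))] else st.1

-- ===== PORT B =====
-- phase 1 (the comprehension): token = none for a UHL1 separator, some value otherwise
def pvTokOf (line : String) : Option (Option String) :=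
  if 3 < PySem.Str.len line ∧ PySem.Str.slice line none (some 3) = "UHL" then
    some (if PySem.Str.slice line none (some 4) = "UHL1" then none
          else some (PySem.Str.slice line (some 4) none))
  else none

-- phase 2, inner while loop: the leading run of non-separator tokens, and the remainder
def pvTakeRun : List (Option String) → List String × List (Option String)
  | [] => ([], [])
  | none :: rest => ([], none :: rest)
  | some v :: rest => let p := pvTakeRun rest; (v :: p.1, p.2)

theorem pvTakeRun_length_le (t : List (Option String)) : (pvTakeRun t).2.length ≤ t.length := by
  induction t with
  | nil => simp [pvTakeRun]
  | cons x rest ih =>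
    cases x with
    | none => simp [pvTakeRun]
    | some v => simpa [pvTakeRun] using Nat.le_succ_of_le ih

-- phase 2, outer while loop: join each maximal run, skip separators
def pvGroups : List (Option String) → List String
  | [] => []
  | none :: rest => pvGroups rest
  | some v :: rest =>
      let p := pvTakeRun rest
      PySem.Str.join "\n" (v :: p.1) :: pvGroups p.2
termination_by t => t.length
decreasing_by
  · simp
  · simpa using Nat.lt_succ_of_le (pvTakeRun_length_le rest)

def parse_geo_comments_section_alt (contents : List String) : List String :=
  pvGroups (contents.filterMap pvTokOf)

-- ===== PRECONDITION & SPEC =====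
def Spec_parse_geo_comments_section (contents : List String) (out : List String) : Prop := out = parse_geo_comments_section_alt contents
instance (contents : List String) (out : List String) : Decidable (Spec_parse_geo_comments_section contents out) := by unfold Spec_parse_geo_comments_section; infer_instance

-- ===== CLAIM (what is proved, stated in full; the proofs are below) =====
def Claim_equal_parse_geo_comments_section : Prop := ∀ (contents : List String), Dom_parse_geo_comments_section contents → Spec_parse_geo_comments_section contents (parse_geo_comments_section contents)

-- ===== LEMMAS AND PROOFS =====

-- A's behaviour on the token stream, with an open pending group
def pvGroupsAux (pending : List String) : List (Option String) → List String
  | [] => if pending = [] then [] else [PySem.Str.join "\n" pending]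
  | none :: rest =>
      (if pending = [] then [] else [PySem.Str.join "\n" pending]) ++ pvGroupsAux [] rest
  | some v :: rest => pvGroupsAux (pending ++ [v]) rest

theorem pvGroupsAux_eq (n : Nat) (t : List (Option String)) (hn : t.length ≤ n) :
    pvGroupsAux [] t = pvGroups t ∧
    ∀ pending, pending ≠ [] →
      pvGroupsAux pending t =
        PySem.Str.join "\n" (pending ++ (pvTakeRun t).1) :: pvGroups (pvTakeRun t).2 := by
  induction n generalizing t with
  | zero =>
    have : t = [] := List.eq_nil_of_length_eq_zero (Nat.le_zero.mp hn)
    subst this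
    exact ⟨by simp [pvGroupsAux, pvGroups], fun p hp => by simp [pvGroupsAux, pvTakeRun, pvGroups, hp]⟩
  | succ n ih =>
    cases t with
    | nil => exact ⟨by simp [pvGroupsAux, pvGroups], fun p hp => by simp [pvGroupsAux, pvTakeRun, pvGroups, hp]⟩
    | cons x rest =>
      have hr : rest.length ≤ n := Nat.lt_succ_iff.mp (Nat.lt_of_lt_of_le (by simp) hn)
      cases x with
      | none =>
        refine ⟨?_, ?_⟩
        · simp [pvGroupsAux, pvGroups, (ih rest hr).1]
        · intro p hp
          simp [pvGroupsAux, pvGroups, pvTakeRun, hp, (ih rest hr).1]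
      | some v =>
        refine ⟨?_, ?_⟩
        · have := (ih rest hr).2 [v] (by simp)
          simpa [pvGroupsAux, pvGroups, pvTakeRun] using this
        · intro p hp
          have := (ih rest hr).2 (p ++ [v]) (by simp)
          simp only [pvGroupsAux, pvTakeRun, this]
          simp

-- A's fold with explicit state equals sets ++ groupsAux over the token stream
theorem pvFoldA_eq (contents : List String) (sets : List String)
    (pending : List (String × String)) :
    (let st := contents.foldl pvStepA (sets, pending)
     if st.2 ≠ [] then st.1 ++ [PySem.Str.join "\n" (st.2.map (fun pv => pv.2))] else st.1) =
    sets ++ pvGroupsAux (pending.map (fun pv => pv.2)) (contents.filterMap pvTokOf) := by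
  induction contents generalizing sets pending with
  | nil =>
    by_cases hp : pending = [] <;>
      simp [pvGroupsAux, hp]
  | cons line rest ih =>
    rw [List.foldl_cons, List.filterMap_cons]
    by_cases hq : 3 < line.length ∧ PySem.Str.slice line none (some 3) = "UHL"
    · by_cases h1 : PySem.Str.slice line none (some 4) = "UHL1"
      · have ht : pvTokOf line = some none := by simp [pvTokOf, hq, h1]
        rw [ht]
        by_cases hp : pending = []
        · have hs : pvStepA (sets, pending) line = (sets, pending) := by
            simp [pvStepA, hq, h1, hp]
          rw [hs, ih]
          simp [pvGroupsAux, hp]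
        · have hs : pvStepA (sets, pending) line =
              (sets ++ [PySem.Str.join "\n" (pending.map (fun pv => pv.2))], []) := by
            simp [pvStepA, hq, h1, hp]
          rw [hs, ih]
          simp [pvGroupsAux, hp, List.map_eq_nil_iff]
      · have ht : pvTokOf line = some (some (PySem.Str.slice line (some 4) none)) := by
          simp [pvTokOf, hq, h1]
        rw [ht]
        have hs : pvStepA (sets, pending) line =
            (sets, pending ++ [(PySem.Str.slice line none (some 4),
                                PySem.Str.slice line (some 4) none)]) := by
          simp [pvStepA, hq, h1]
        rw [hs, ih]
        simp [pvGroupsAux]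
    · have ht : pvTokOf line = none := by simp [pvTokOf, hq]
      rw [ht]
      have hs : pvStepA (sets, pending) line = (sets, pending) := by simp [pvStepA, hq]
      rw [hs]
      exact ih sets pending

-- ===== VERDICT (by name: the statement is the Claim_ definition above) =====
theorem parse_geo_comments_section_spec : Claim_equal_parse_geo_comments_section := by
  intro contents _
  unfold Spec_parse_geo_comments_section parse_geo_comments_section parse_geo_comments_section_alt
  have h := pvFoldA_eq contents [] []
  simp only [List.map_nil] at h
  rw [h, (pvGroupsAux_eq (contents.filterMap pvTokOf).length _ le_rfl).1, List.nil_append]
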